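-- pv_equiv track=rewrite | github.com/Amitabh-Shanker/insight-weave-86 | ml/app.py | get_care_tips
-- ===== SOURCE A (Python) =====
-- from typing import Dict, List, Set, Tuple
--
-- general_care_tips = {
--     "hydration": "Drink plenty of fluids (water, clear broths, herbal tea)",
--     "rest": "Get adequate sleep and rest to help your body recover",
--     "nutrition": "Eat nutritious, balanced meals to support your immune system",
--     "hygiene": "Practice good hygiene to prevent spread of infection",
--     "monitoring": "Keep a symptom diary to track changes and patterns",
-- }
--
-- def get_care_tips(symptoms: List[str], diseases: List[Dict]) -> List[str]:
--     """Generate care tips based on symptoms"""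
--     tips = []
--
--     if any(s in ["fever", "cough", "sore throat"] for s in symptoms):
--         tips.append(general_care_tips["hydration"])
--         tips.append(general_care_tips["rest"])
--
--     if any(s in ["stomach pain", "nausea", "vomiting"] for s in symptoms):
--         tips.append("Eat bland foods (BRAT diet: bananas, rice, applesauce, toast)")
--         tips.append("Avoid spicy, fatty, or heavy foods")
--
--     if any(s in ["headache", "migraine"] for s in symptoms):
--         tips.append("Rest in a quiet, dark room")
--         tips.append("Apply cold or warm compress to head or neck")
--
--     if any(s in ["cough", "congestion"] for s in symptoms):
--         tips.append("Use a humidifier to add moisture to the air")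
--
--     tips.append(general_care_tips["monitoring"])
--
--     return tips[:5]
-- ===== SOURCE B (Python) =====
-- from typing import Dict, List
--
-- general_care_tips = {
--     "hydration": "Drink plenty of fluids (water, clear broths, herbal tea)",
--     "rest": "Get adequate sleep and rest to help your body recover",
--     "nutrition": "Eat nutritious, balanced meals to support your immune system",
--     "hygiene": "Practice good hygiene to prevent spread of infection",
--     "monitoring": "Keep a symptom diary to track changes and patterns",
-- }
--
-- # Inverted index: each known symptom maps to the rule group(s) it triggers.
-- _SYMPTOM_TO_RULES = {
--     "fever": (0,),
--     "cough": (0, 3),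
--     "sore throat": (0,),
--     "stomach pain": (1,),
--     "nausea": (1,),
--     "vomiting": (1,),
--     "headache": (2,),
--     "migraine": (2,),
--     "congestion": (3,),
-- }
--
-- _RULE_TIPS = [
--     [general_care_tips["hydration"], general_care_tips["rest"]],
--     ["Eat bland foods (BRAT diet: bananas, rice, applesauce, toast)",
--      "Avoid spicy, fatty, or heavy foods"],
--     ["Rest in a quiet, dark room",
--      "Apply cold or warm compress to head or neck"],
--     ["Use a humidifier to add moisture to the air"],
-- ]
--
-- def get_care_tips(symptoms: List[str], diseases: List[Dict]) -> List[str]: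
--     """Generate care tips based on symptoms (inverted-index version)."""
--     triggered = [False] * len(_RULE_TIPS)
--     for s in symptoms:
--         for i in _SYMPTOM_TO_RULES.get(s, ()):
--             triggered[i] = True
--     tips = [t for i, on in enumerate(triggered) if on for t in _RULE_TIPS[i]]
--     tips.append(general_care_tips["monitoring"])
--     return tips[:5]
-- ===== Notes on version B (the rewrite author's own statement) =====
-- stated objective: alternative
-- what changed: Inverts the traversal: instead of A's four if-blocks each scanning the symptom list for a trigger group, B folds once over the symptoms through an inverted symptom-to-rule-index map, setting per-rule flags, then emits the tips of the flagged rules.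
import Mathlib
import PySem

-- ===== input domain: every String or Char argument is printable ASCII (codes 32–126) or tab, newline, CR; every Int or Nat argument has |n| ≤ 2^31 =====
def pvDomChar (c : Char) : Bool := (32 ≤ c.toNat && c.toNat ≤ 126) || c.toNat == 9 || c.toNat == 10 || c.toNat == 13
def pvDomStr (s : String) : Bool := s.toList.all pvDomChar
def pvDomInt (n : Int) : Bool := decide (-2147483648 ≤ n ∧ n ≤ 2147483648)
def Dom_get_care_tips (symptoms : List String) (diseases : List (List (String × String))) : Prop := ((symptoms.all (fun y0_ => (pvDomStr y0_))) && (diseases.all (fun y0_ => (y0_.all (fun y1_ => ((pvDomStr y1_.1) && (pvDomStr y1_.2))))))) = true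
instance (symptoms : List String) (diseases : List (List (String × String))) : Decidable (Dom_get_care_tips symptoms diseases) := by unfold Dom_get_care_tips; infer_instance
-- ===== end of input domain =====

-- B inverts A's rule scan: a symptom->rule-indices index is folded over the symptoms once to set flags, and tips are emitted from the flags; same cost, inverted traversal.


-- ===== PORT A =====
def get_care_tips (symptoms : List String) (diseases : List (List (String × String))) : List String :=
  let tips : List String := []
  let tips := if symptoms.any (fun s => (["fever", "cough", "sore throat"] : List String).contains s) then
      tips ++ ["Drink plenty of fluids (water, clear broths, herbal tea)",
               "Get adequate sleep and rest to help your body recover"]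
    else tips
  let tips := if symptoms.any (fun s => (["stomach pain", "nausea", "vomiting"] : List String).contains s) then
      tips ++ ["Eat bland foods (BRAT diet: bananas, rice, applesauce, toast)",
               "Avoid spicy, fatty, or heavy foods"]
    else tips
  let tips := if symptoms.any (fun s => (["headache", "migraine"] : List String).contains s) then
      tips ++ ["Rest in a quiet, dark room",
               "Apply cold or warm compress to head or neck"]
    else tips
  let tips := if symptoms.any (fun s => (["cough", "congestion"] : List String).contains s) then
      tips ++ ["Use a humidifier to add moisture to the air"]
    else tips
  let tips := tips ++ ["Keep a symptom diary to track changes and patterns"]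
  PySem.List.slice tips none (some 5)

-- ===== PORT B =====
-- inverted index: symptom -> rule indices it triggers (dict literal; keys are distinct)
def symptomToRules : List (String × List Nat) :=
  [ ("fever", [0]), ("cough", [0, 3]), ("sore throat", [0]),
    ("stomach pain", [1]), ("nausea", [1]), ("vomiting", [1]),
    ("headache", [2]), ("migraine", [2]), ("congestion", [3]) ]

def ruleTips : List (List String) :=
  [ ["Drink plenty of fluids (water, clear broths, herbal tea)",
     "Get adequate sleep and rest to help your body recover"],
    ["Eat bland foods (BRAT diet: bananas, rice, applesauce, toast)",
     "Avoid spicy, fatty, or heavy foods"],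
    ["Rest in a quiet, dark room",
     "Apply cold or warm compress to head or neck"],
    ["Use a humidifier to add moisture to the air"] ]

def get_care_tips_alt (symptoms : List String) (diseases : List (List (String × String))) : List String :=
  let triggered := symptoms.foldl
    (fun fl s => ((symptomToRules.lookup s).getD []).foldl (fun fl i => fl.set i true) fl)
    (List.replicate ruleTips.length false)
  let tips := (PySem.List.enumerate triggered).flatMap
    (fun p => if p.2 then PySem.List.pyGetD ruleTips p.1 [] else [])
  let tips := tips ++ ["Keep a symptom diary to track changes and patterns"]
  PySem.List.slice tips none (some 5)

-- ===== PRECONDITION & SPEC =====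
def Spec_get_care_tips (symptoms : List String) (diseases : List (List (String × String))) (out : List String) : Prop := out = get_care_tips_alt symptoms diseases
instance (symptoms : List String) (diseases : List (List (String × String))) (out : List String) : Decidable (Spec_get_care_tips symptoms diseases out) := by unfold Spec_get_care_tips; infer_instance

-- ===== CLAIM (what is proved, stated in full; the proofs are below) =====
def Claim_equal_get_care_tips : Prop := ∀ (symptoms : List String) (diseases : List (List (String × String))), Dom_get_care_tips symptoms diseases → Spec_get_care_tips symptoms diseases (get_care_tips symptoms diseases)

-- ===== LEMMAS AND PROOFS =====

-- processing one symptom through the inverted index ORs each flag with that symptom's membership in the corresponding trigger group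
lemma step_eq (s : String) (b0 b1 b2 b3 : Bool) :
    ((symptomToRules.lookup s).getD []).foldl (fun fl i => fl.set i true) [b0, b1, b2, b3]
      = [b0 || (["fever", "cough", "sore throat"] : List String).contains s,
         b1 || (["stomach pain", "nausea", "vomiting"] : List String).contains s,
         b2 || (["headache", "migraine"] : List String).contains s,
         b3 || (["cough", "congestion"] : List String).contains s] := by
  by_cases h1 : s = "fever"
  · subst h1; simp [show List.lookup "fever" symptomToRules = some [0] from rfl, List.set]
  by_cases h2 : s = "cough"
  · subst h2; simp [show List.lookup "cough" symptomToRules = some [0, 3] from rfl, List.set]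
  by_cases h3 : s = "sore throat"
  · subst h3; simp [show List.lookup "sore throat" symptomToRules = some [0] from rfl, List.set]
  by_cases h4 : s = "stomach pain"
  · subst h4; simp [show List.lookup "stomach pain" symptomToRules = some [1] from rfl, List.set]
  by_cases h5 : s = "nausea"
  · subst h5; simp [show List.lookup "nausea" symptomToRules = some [1] from rfl, List.set]
  by_cases h6 : s = "vomiting"
  · subst h6; simp [show List.lookup "vomiting" symptomToRules = some [1] from rfl, List.set]
  by_cases h7 : s = "headache"
  · subst h7; simp [show List.lookup "headache" symptomToRules = some [2] from rfl, List.set]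
  by_cases h8 : s = "migraine"
  · subst h8; simp [show List.lookup "migraine" symptomToRules = some [2] from rfl, List.set]
  by_cases h9 : s = "congestion"
  · subst h9; simp [show List.lookup "congestion" symptomToRules = some [3] from rfl, List.set]
  have e : ∀ t : String, ¬ s = t → (s == t) = false := fun t h => beq_eq_false_iff_ne.mpr h
  simp [symptomToRules, List.lookup, e _ h1, e _ h2, e _ h3, e _ h4, e _ h5,
        e _ h6, e _ h7, e _ h8, e _ h9, h1, h2, h3, h4, h5, h6, h7, h8, h9]

-- the whole fold computes, per rule, initial flag OR "some symptom is in the trigger group"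
lemma fold_eq (symptoms : List String) (b0 b1 b2 b3 : Bool) :
    symptoms.foldl
      (fun fl s => ((symptomToRules.lookup s).getD []).foldl (fun fl i => fl.set i true) fl)
      [b0, b1, b2, b3]
      = [b0 || symptoms.any (fun s => (["fever", "cough", "sore throat"] : List String).contains s),
         b1 || symptoms.any (fun s => (["stomach pain", "nausea", "vomiting"] : List String).contains s),
         b2 || symptoms.any (fun s => (["headache", "migraine"] : List String).contains s),
         b3 || symptoms.any (fun s => (["cough", "congestion"] : List String).contains s)] := by
  induction symptoms generalizing b0 b1 b2 b3 with
  | nil => simp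
  | cons s rest ih =>
    rw [List.foldl_cons, step_eq, ih]
    simp [Bool.or_assoc]

-- ===== VERDICT (by name: the statement is the Claim_ definition above) =====
theorem get_care_tips_spec : Claim_equal_get_care_tips := by
  intro symptoms diseases _
  unfold Spec_get_care_tips get_care_tips get_care_tips_alt
  have h := fold_eq symptoms false false false false
  simp only [ruleTips, List.length_cons, List.length_nil, List.replicate] at *
  rw [h]
  simp only [Bool.false_or]
  generalize symptoms.any (fun s => (["fever", "cough", "sore throat"] : List String).contains s) = a0
  generalize symptoms.any (fun s => (["stomach pain", "nausea", "vomiting"] : List String).contains s) = a1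
  generalize symptoms.any (fun s => (["headache", "migraine"] : List String).contains s) = a2
  generalize symptoms.any (fun s => (["cough", "congestion"] : List String).contains s) = a3
  cases a0 <;> cases a1 <;> cases a2 <;> cases a3 <;> rfl
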